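-- pv_equiv track=rewrite | github.com/Guzpenha/slice_based_learning | ir_slices/ir_slices/data_processors.py | transform_to_q_docs_format
-- ===== SOURCE A (Python) =====
-- def transform_to_q_docs_format(examples):
--     """
--     Groups examples of each query.
--     BE CAREFUL! This function assumes that every query has only one relevant document.
--     """
--     doc_q_examples = []
--     docs = []
--     labels = []
--     for i, example in enumerate(examples):
--         if example[2] == "1" and i!=0:
--             doc_q_examples.append([examples[i-1][0], docs, labels])
--             docs = []
--             labels = []
--         docs.append(example[1])
--         labels.append(example[2])
--
--         if i == (len(examples)-1):
--             doc_q_examples.append([example[0], docs, labels])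
--     return doc_q_examples
-- ===== SOURCE B (Python) =====
-- def transform_to_q_docs_format(examples):
--     """
--     Groups examples of each query by splitting at each row labelled "1"
--     (except a leading one), slicing out whole segments instead of carrying
--     per-row accumulators; each group is labelled with its last row's query id.
--     """
--     out = []
--     rest = examples
--     while rest:
--         i = 1
--         while i < len(rest) and rest[i][2] != "1":
--             i += 1
--         seg = rest[:i]
--         out.append([seg[-1][0], [e[1] for e in seg], [e[2] for e in seg]])
--         rest = rest[i:]
--     return out
-- ===== Notes on version B (the rewrite author's own statement) =====
-- stated objective: simpler
-- what changed: A carries per-row docs/labels accumulators and a lookback index examples[i-1] through one enumerate loop; B instead cuts the list into segments before each row labelled "1" (except a leading one) and emits each whole slice at once, labelling it with its last row's query id.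
import Mathlib
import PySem

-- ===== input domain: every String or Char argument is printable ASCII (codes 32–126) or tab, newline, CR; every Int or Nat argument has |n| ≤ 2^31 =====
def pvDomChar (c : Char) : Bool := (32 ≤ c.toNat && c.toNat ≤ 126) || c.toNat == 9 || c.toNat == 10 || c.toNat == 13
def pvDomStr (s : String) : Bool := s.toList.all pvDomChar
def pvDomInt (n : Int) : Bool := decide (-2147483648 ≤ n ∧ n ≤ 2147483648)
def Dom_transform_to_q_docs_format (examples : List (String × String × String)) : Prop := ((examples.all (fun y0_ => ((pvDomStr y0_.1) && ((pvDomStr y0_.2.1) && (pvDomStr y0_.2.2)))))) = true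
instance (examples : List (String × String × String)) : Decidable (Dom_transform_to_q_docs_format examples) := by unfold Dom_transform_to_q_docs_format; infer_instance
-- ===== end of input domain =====

-- B replaces A's per-row append-with-carry loop by a segment decomposition (cut before
-- every "1"-labelled row except a leading one, emit whole slices); objective: simpler, same cost.

-- ===== PORT A =====
-- loop body of A's for-loop over enumerate(examples)
def stepA (examples : List (String × String × String))
    (st : List (String × List String × List String) × List String × List String)
    (ie : Int × (String × String × String)) :
    List (String × List String × List String) × List String × List String :=
  let i := ie.1
  let ex := ie.2
  let st1 :=
    if ex.2.2 == "1" && i != 0 then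
      (st.1 ++ [((PySem.List.pyGetD examples (i - 1) default).1, st.2.1, st.2.2)],
       ([] : List String), ([] : List String))
    else st
  let docs := st1.2.1 ++ [ex.2.1]
  let labels := st1.2.2 ++ [ex.2.2]
  let acc := if i == (examples.length : Int) - 1 then st1.1 ++ [(ex.1, docs, labels)] else st1.1
  (acc, docs, labels)

def transform_to_q_docs_format (examples : List (String × String × String)) : List (String × List String × List String) :=
  ((PySem.List.enumerate examples 0).foldl (stepA examples) ([], [], [])).1

-- ===== PORT B =====
def transform_to_q_docs_format_alt (examples : List (String × String × String)) : List (String × List String × List String) :=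
  match examples with
  | [] => []
  | x :: xs =>
    -- inner while loop + slices: seg = rest[:i] = first row plus following rows not labelled "1"
    let seg := x :: xs.takeWhile (fun e => !(e.2.2 == "1"))
    ((PySem.List.pyGetD seg (-1) default).1, seg.map (·.2.1), seg.map (·.2.2)) ::
      transform_to_q_docs_format_alt (xs.dropWhile (fun e => !(e.2.2 == "1")))
termination_by examples.length
decreasing_by
  have := List.length_dropWhile_le (fun e : String × String × String => !(e.2.2 == "1")) xs
  simp; omega

-- ===== PRECONDITION & SPEC =====
def Spec_transform_to_q_docs_format (examples : List (String × String × String)) (out : List (String × List String × List String)) : Prop := out = transform_to_q_docs_format_alt examples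
instance (examples : List (String × String × String)) (out : List (String × List String × List String)) : Decidable (Spec_transform_to_q_docs_format examples out) := by unfold Spec_transform_to_q_docs_format; infer_instance

-- ===== CLAIM (what is proved, stated in full; the proofs are below) =====
def Claim_equal_transform_to_q_docs_format : Prop := ∀ (examples : List (String × String × String)), Dom_transform_to_q_docs_format examples → Spec_transform_to_q_docs_format examples (transform_to_q_docs_format examples)

-- ===== LEMMAS AND PROOFS =====

-- proof-side recursive characterisation of A's loop on the suffix after index 0:
-- prev = previous row, docs/labels = the running accumulators; fin fires at the last row
def h0 (prev : String × String × String) (docs labels : List String) :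
    List (String × String × String) → List (String × List String × List String)
  | [] => []
  | ex :: rest =>
    let pre := if ex.2.2 == "1" then [(prev.1, docs, labels)] else []
    let d := if ex.2.2 == "1" then [ex.2.1] else docs ++ [ex.2.1]
    let l := if ex.2.2 == "1" then [ex.2.2] else labels ++ [ex.2.2]
    let fin := if rest = [] then [(ex.1, d, l)] else []
    pre ++ fin ++ h0 ex d l rest

-- same recursion with the final flush folded into the empty case
def hA (prev : String × String × String) (docs labels : List String) :
    List (String × String × String) → List (String × List String × List String)
  | [] => [(prev.1, docs, labels)]
  | ex :: rest =>
    if ex.2.2 == "1" then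
      (prev.1, docs, labels) :: hA ex [ex.2.1] [ex.2.2] rest
    else hA ex (docs ++ [ex.2.1]) (labels ++ [ex.2.2]) rest

lemma pyGetD_append_last {α : Type} [Inhabited α] (pre ys : List α) (h : pre ≠ []) (d : α) :
    PySem.List.pyGetD (pre ++ ys) ((pre.length : Int) - 1) d = pre.getLast h := by
  have hl : 0 < pre.length := List.length_pos_of_ne_nil h
  rw [PySem.List.pyGetD_eq_getElem _ _ (by omega) (by simp)]
  have ht : (((pre.length : Int)) - 1).toNat = pre.length - 1 := by omega
  rw [List.getLast_eq_getElem]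
  simp only [ht]
  rw [List.getElem_append_left (by omega)]

lemma pyGetD_neg_one_cons {α : Type} [Inhabited α] (x : α) (t : List α) (d : α) :
    PySem.List.pyGetD (x :: t) (-1) d = (x :: t).getLast (by simp) :=
  PySem.List.pyGetD_neg_one _ _ (by simp)

-- A's fold on a nonempty prefix/suffix split equals h0 started at the prefix's last row
lemma foldA_suffix : ∀ (xs pre : List (String × String × String)) (hpre : pre ≠ [])
    (acc : List (String × List String × List String)) (docs labels : List String),
    ((PySem.List.enumerate xs (pre.length : Int)).foldl (stepA (pre ++ xs)) (acc, docs, labels)).1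
      = acc ++ h0 (pre.getLast hpre) docs labels xs := by
  intro xs
  induction xs with
  | nil => intro pre hpre acc docs labels; simp [PySem.List.enumerate, h0]
  | cons ex rest ih =>
    intro pre hpre acc docs labels
    have hl : 0 < pre.length := List.length_pos_of_ne_nil hpre
    rw [PySem.List.enumerate_cons, List.foldl_cons]
    have hstep : stepA (pre ++ ex :: rest) (acc, docs, labels) ((pre.length : Int), ex) =
        (acc ++ (if ex.2.2 == "1" then [((pre.getLast hpre).1, docs, labels)] else [])
             ++ (if rest = [] then [(ex.1,
                    (if ex.2.2 == "1" then [ex.2.1] else docs ++ [ex.2.1]),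
                    (if ex.2.2 == "1" then [ex.2.2] else labels ++ [ex.2.2]))] else []),
         (if ex.2.2 == "1" then [ex.2.1] else docs ++ [ex.2.1]),
         (if ex.2.2 == "1" then [ex.2.2] else labels ++ [ex.2.2])) := by
      have hne : ((pre.length : Int) != 0) = true := by simp; omega
      have hcond : ((pre.length : Int) == ((pre ++ ex :: rest).length : Int) - 1) = decide (rest = []) := by
        by_cases hr : rest = []
        · simp [hr]
        · have hp := List.length_pos_of_ne_nil hr
          simp [hr]
          omega
      simp only [stepA, hne, hcond, Bool.and_true, pyGetD_append_last _ _ hpre]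
      by_cases h1 : ex.2.2 == "1" <;> by_cases hr : rest = [] <;> simp [h1, hr]
    rw [hstep]
    have hre : pre ++ ex :: rest = (pre ++ [ex]) ++ rest := by simp
    have hlen2 : (pre.length : Int) + 1 = ((pre ++ [ex]).length : Int) := by simp
    rw [hre, hlen2, ih (pre ++ [ex]) (by simp)]
    have hgl : (pre ++ [ex]).getLast (by simp) = ex := List.getLast_append_singleton ..
    rw [hgl]
    conv_rhs => rw [h0]
    by_cases h1 : ex.2.2 == "1" <;> by_cases hr : rest = [] <;> simp [h1, hr]

lemma hA_eq_h0 : ∀ (xs : List (String × String × String)), xs ≠ [] → ∀ prev docs labels,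
    hA prev docs labels xs = h0 prev docs labels xs := by
  intro xs
  induction xs with
  | nil => intro h; exact absurd rfl h
  | cons ex rest ih =>
    intro _ prev docs labels
    by_cases hr : rest = []
    · subst hr
      by_cases h1 : ex.2.2 == "1" <;> simp [hA, h0, h1]
    · by_cases h1 : ex.2.2 == "1" <;> simp [hA, h0, h1, hr, ih hr]

-- hA computes B's first emitted group (via takeWhile) followed by B on the remainder
lemma hA_eq_alt : ∀ (xs : List (String × String × String)) prev docs labels,
    hA prev docs labels xs =
      (((prev :: xs.takeWhile (fun e => !(e.2.2 == "1"))).getLast (by simp)).1,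
        docs ++ (xs.takeWhile (fun e => !(e.2.2 == "1"))).map (·.2.1),
        labels ++ (xs.takeWhile (fun e => !(e.2.2 == "1"))).map (·.2.2)) ::
      transform_to_q_docs_format_alt (xs.dropWhile (fun e => !(e.2.2 == "1"))) := by
  intro xs
  induction xs with
  | nil => intro prev docs labels; simp [hA, transform_to_q_docs_format_alt]
  | cons ex rest ih =>
    intro prev docs labels
    by_cases h1 : ex.2.2 == "1"
    · rw [hA]
      simp only [h1]
      rw [ih ex [ex.2.1] [ex.2.2]]
      have htw : (ex :: rest).takeWhile (fun e => !(e.2.2 == "1")) = [] := by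
        simp [List.takeWhile, h1]
      have hdw : (ex :: rest).dropWhile (fun e => !(e.2.2 == "1")) = ex :: rest := by
        simp [List.dropWhile, h1]
      rw [htw, hdw]
      conv_rhs => rw [transform_to_q_docs_format_alt]
      simp [pyGetD_neg_one_cons]
    · rw [hA]
      simp only [h1]
      rw [ih ex (docs ++ [ex.2.1]) (labels ++ [ex.2.2])]
      have htw : (ex :: rest).takeWhile (fun e => !(e.2.2 == "1")) =
          ex :: rest.takeWhile (fun e => !(e.2.2 == "1")) := by
        simp [List.takeWhile, h1]
      have hdw : (ex :: rest).dropWhile (fun e => !(e.2.2 == "1")) =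
          rest.dropWhile (fun e => !(e.2.2 == "1")) := by
        simp [List.dropWhile, h1]
      rw [htw, hdw]
      have hgl : (prev :: ex :: rest.takeWhile (fun e => !(e.2.2 == "1"))).getLast (by simp) =
          (ex :: rest.takeWhile (fun e => !(e.2.2 == "1"))).getLast (by simp) :=
        List.getLast_cons _
      rw [hgl]
      simp

lemma ports_agree : ∀ (examples : List (String × String × String)),
    transform_to_q_docs_format examples = transform_to_q_docs_format_alt examples := by
  intro examples
  match examples with
  | [] => simp [transform_to_q_docs_format, PySem.List.enumerate, transform_to_q_docs_format_alt]
  | x :: xs =>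
    rw [transform_to_q_docs_format, PySem.List.enumerate_cons, List.foldl_cons]
    have hstep : stepA (x :: xs) ([], [], []) ((0 : Int), x) =
        ((if xs = [] then [(x.1, [x.2.1], [x.2.2])] else []), [x.2.1], [x.2.2]) := by
      have hcond : ((0 : Int) == ((x :: xs).length : Int) - 1) = decide (xs = []) := by
        by_cases hr : xs = []
        · simp [hr]
        · have hp := List.length_pos_of_ne_nil hr
          simp [hr]
          omega
      simp only [stepA, hcond]
      by_cases hr : xs = [] <;> simp [hr]
    rw [hstep]
    by_cases hr : xs = []
    · subst hr
      simp [PySem.List.enumerate, transform_to_q_docs_format_alt, pyGetD_neg_one_cons]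
    · have h1 : ((0 : Int) + 1) = (([x] : List (String × String × String)).length : Int) := by simp
      have h2 : x :: xs = [x] ++ xs := by simp
      rw [h1, h2, foldA_suffix xs [x] (by simp)]
      have hgl : ([x] : List (String × String × String)).getLast (by simp) = x := by simp
      rw [hgl, ← hA_eq_h0 xs hr, hA_eq_alt]
      conv_rhs => rw [show ([x] ++ xs) = x :: xs from rfl]; rw [transform_to_q_docs_format_alt]
      simp [pyGetD_neg_one_cons, hr]

-- ===== VERDICT (by name: the statement is the Claim_ definition above) =====
theorem transform_to_q_docs_format_spec : Claim_equal_transform_to_q_docs_format := by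
  intro examples _
  unfold Spec_transform_to_q_docs_format
  exact ports_agree examples
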